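-- pv_equiv track=rewrite | github.com/arendst/Tasmota | tools/unishox/compress-html-uncompressed.py | extract_c_string
-- ===== SOURCE A (Python) =====
-- def extract_c_string(s: str) -> str:
--   state = 0
--   escape = False
--   out = ""
--   for c in s:
--     if state == 0:    # before string
--       if c == '"':      # entering string
--         out = '"'
--         state = 1
--       elif c == '/':    # start of comment before entering string
--         state = 99      # we're done
--     elif state == 1:  # in string
--       if escape:        # escaped char
--         out += '\\' + c
--         escape = False
--       elif c == '\\':   # escaped char
--         escape = True
--       elif c == '"':    # end of string
--         out += '"'
--         state = 99      # we're done
--       else: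
--         out += c
--   return out
-- ===== SOURCE B (Python) =====
-- def extract_c_string(s: str) -> str:
--     q = s.find('"')
--     sl = s.find('/')
--     if q == -1 or (sl != -1 and sl < q):
--         return ""
--     parts = ['"']
--     i = q + 1
--     n = len(s)
--     while i < n:
--         c = s[i]
--         if c == '\\':
--             if i + 1 == n:
--                 break
--             parts.append('\\' + s[i + 1])
--             i += 2
--         elif c == '"':
--             parts.append('"')
--             break
--         else:
--             parts.append(c)
--             i += 1
--     return ''.join(parts)
-- ===== Notes on version B (the rewrite author's own statement) =====
-- stated objective: faster
-- what changed: Replaced the per-character three-state state machine (state/escape flags) with str.find to locate the first quote vs slash, then a single escape-pair-aware copy loop over the string body joined at the end.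
import Mathlib
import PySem

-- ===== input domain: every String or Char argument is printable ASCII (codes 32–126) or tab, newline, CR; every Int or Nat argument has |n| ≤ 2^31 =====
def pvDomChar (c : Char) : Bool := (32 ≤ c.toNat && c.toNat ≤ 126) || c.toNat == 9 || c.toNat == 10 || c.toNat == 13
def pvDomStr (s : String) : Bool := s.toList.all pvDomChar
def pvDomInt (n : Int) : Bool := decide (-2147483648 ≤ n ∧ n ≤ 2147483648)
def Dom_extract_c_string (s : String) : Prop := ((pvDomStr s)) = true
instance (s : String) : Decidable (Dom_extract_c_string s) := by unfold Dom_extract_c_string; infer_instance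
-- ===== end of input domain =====

-- B replaces A's per-char state machine by str.find (first quote vs slash) + an escape-aware copy of the string body; measured faster by a constant factor.

-- ===== PORT A =====
-- one step of A's loop; state ∈ {0 before string, 1 in string, 99 done}, with escape flag and output
def stepA (st : Int × Bool × List Char) (c : Char) : Int × Bool × List Char :=
  let state := st.1
  let escape := st.2.1
  let out := st.2.2
  if state = 0 then
    if c = '"' then (1, escape, ['"'])
    else if c = '/' then (99, escape, out)
    else st
  else if state = 1 then
    if escape then (state, false, out ++ ['\\', c])
    else if c = '\\' then (state, true, out)
    else if c = '"' then (99, escape, out ++ ['"'])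
    else (state, escape, out ++ [c])
  else st

def extract_c_string (s : String) : String :=
  String.ofList (s.toList.foldl stepA (0, false, [])).2.2

-- ===== PORT B =====
-- the while loop of Source B: walks the rest of the string (s[i:] is the list argument,
-- advancing i by 1 or 2 is consuming one or two chars), appending to parts
def loopB : List Char → List Char → List Char
  | [], parts => parts
  | c :: rest, parts =>
    if c = '\\' then
      match rest with
      | [] => parts
      | d :: rest' => loopB rest' (parts ++ ['\\', d])
    else if c = '"' then parts ++ ['"']
    else loopB rest (parts ++ [c])

def extract_c_string_alt (s : String) : String :=
  let q := PySem.Str.find s "\""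
  let sl := PySem.Str.find s "/"
  if q = -1 ∨ (sl ≠ -1 ∧ sl < q) then ""
  else String.ofList (loopB (PySem.List.slice s.toList (some (q + 1)) none) ['"'])

-- ===== PRECONDITION & SPEC =====
def Spec_extract_c_string (s : String) (out : String) : Prop := out = extract_c_string_alt s
instance (s : String) (out : String) : Decidable (Spec_extract_c_string s out) := by unfold Spec_extract_c_string; infer_instance

-- ===== CLAIM (what is proved, stated in full; the proofs are below) =====
def Claim_equal_extract_c_string : Prop := ∀ (s : String), Dom_extract_c_string s → Spec_extract_c_string s (extract_c_string s)

-- ===== LEMMAS AND PROOFS =====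

-- proof-side helper: loopB without its accumulator
def takeB : List Char → List Char
  | [] => []
  | c :: rest =>
    if c = '\\' then
      match rest with
      | [] => []
      | d :: rest' => '\\' :: d :: takeB rest'
    else if c = '"' then ['"']
    else c :: takeB rest

theorem loopB_eq_takeB (l : List Char) (parts : List Char) :
    loopB l parts = parts ++ takeB l := by
  induction l using takeB.induct generalizing parts with
  | case1 => simp [loopB, takeB]
  | case2 => simp [loopB, takeB]
  | case3 d rest' ih => simp [loopB, takeB, ih]
  | case4 rest' h =>
    rw [loopB.eq_def, takeB.eq_def]
    simp [h]
  | case5 d rest' h1 h2 ih =>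
    rw [loopB.eq_def, takeB.eq_def]
    simp [h1, h2, ih]

-- reference recursion: what both programs compute, phrased structurally
def scan0 : List Char → List Char
  | [] => []
  | c :: r => if c = '"' then '"' :: takeB r else if c = '/' then [] else scan0 r

theorem foldl_stepA_99 (l : List Char) (e : Bool) (out : List Char) :
    l.foldl stepA (99, e, out) = (99, e, out) := by
  induction l with
  | nil => rfl
  | cons c r ih => simpa [stepA] using ih

theorem foldl_stepA_1 (l : List Char) (out : List Char) :
    (l.foldl stepA (1, false, out)).2.2 = out ++ takeB l := by
  induction l using takeB.induct generalizing out with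
  | case1 => simp [takeB]
  | case2 => simp [stepA, takeB]
  | case3 d rest' ih => simp [stepA, takeB, ih]
  | case4 rest' h =>
    simp [stepA, foldl_stepA_99]
    rw [takeB.eq_def]; simp
  | case5 d rest' h1 h2 ih =>
    simp [stepA, h1, h2, ih]
    conv => rhs; rw [takeB.eq_def]
    simp [h1, h2]

theorem foldl_stepA_0 (l : List Char) :
    (l.foldl stepA (0, false, [])).2.2 = scan0 l := by
  induction l with
  | nil => rfl
  | cons c r ih =>
    by_cases h1 : c = '"'
    · simp [stepA, scan0, h1, foldl_stepA_1]
    · by_cases h2 : c = '/'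
      · simp [stepA, scan0, h2, foldl_stepA_99]
      · simpa [stepA, scan0, h1, h2] using ih

theorem go_single_cons (c a : Char) (l : List Char) (i : Nat) :
    PySem.Chars.find.go [a] (c :: l) i =
      if c = a then (i : Int) else PySem.Chars.find.go [a] l (i + 1) := by
  rw [PySem.Chars.find.go]
  by_cases h : c = a
  · simp [h]
  · simp [h, (Ne.symm h : a ≠ c)]

theorem go_single_nil (a : Char) (i : Nat) : PySem.Chars.find.go [a] [] i = -1 := by
  simp [PySem.Chars.find.go]

theorem go_single_eq (a : Char) (l : List Char) (i : Nat) :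
    PySem.Chars.find.go [a] l i =
      match l.findIdx? (· = a) with
      | none => -1
      | some n => ((i + n : Nat) : Int) := by
  induction l generalizing i with
  | nil => simp [go_single_nil]
  | cons c r ih =>
    rw [go_single_cons]
    by_cases h : c = a
    · simp [h, List.findIdx?_cons]
    · rw [if_neg h, ih (i + 1), List.findIdx?_cons]
      simp only [h, decide_eq_true_eq, if_false]
      cases hr : r.findIdx? (· = a)
      · simp
      · simp; ac_rfl

theorem find_single (a : Char) (l : List Char) :
    PySem.Chars.find l [a] =
      match l.findIdx? (· = a) with
      | none => -1
      | some n => (n : Int) := by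
  rw [PySem.Chars.find, go_single_eq]
  cases l.findIdx? (· = a) <;> simp

theorem pvCastAddTwo (n : Nat) : ((n : Int)) + 1 + 1 = ((n + 2 : Nat) : Int) := by omega

theorem pvCastAddOne (n : Nat) : ((n : Int)) + 1 = ((n + 1 : Nat) : Int) := by omega

theorem pvCastSuccNe (n : Nat) : ¬(((n : Int)) + 1 = -1) := by omega

theorem altBody_eq_scan0 (l : List Char) :
    (if PySem.Chars.find l ['"'] = -1 ∨
        (PySem.Chars.find l ['/'] ≠ -1 ∧ PySem.Chars.find l ['/'] < PySem.Chars.find l ['"']) then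
      ([] : List Char)
     else '"' :: takeB (PySem.List.slice l (some (PySem.Chars.find l ['"'] + 1)) none)) = scan0 l := by
  induction l with
  | nil => decide
  | cons c r ih =>
    rw [scan0, find_single, find_single, List.findIdx?_cons, List.findIdx?_cons]
    rw [find_single, find_single] at ih
    by_cases h1 : c = '"'
    · subst h1
      cases hsl : r.findIdx? (· = '/')
      · simp [PySem.List.slice_from_one]
      · simp [PySem.List.slice_from_one]
        rename_i v
        intro hne
        exact Int.add_nonneg (Int.natCast_nonneg v) (by decide)
    · by_cases h2 : c = '/'
      · subst h2
        cases hq : r.findIdx? (· = '"') <;> simp [h1]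
      · simp only [h1, h2, decide_eq_true_eq, not_false_iff, if_neg]
        cases hq : r.findIdx? (· = '"')
        · simp [hq] at ih ⊢
          simpa [h1] using ih
        · rename_i n
          cases hsl : r.findIdx? (· = '/')
          · simp [hq, hsl] at ih ⊢
            rw [if_neg (pvCastSuccNe n), pvCastAddTwo, PySem.List.slice_from_natCast,
              List.drop_succ_cons]
            rw [pvCastAddOne, PySem.List.slice_from_natCast] at ih
            exact ih
          · rename_i m
            simp [hq, hsl] at ih ⊢
            by_cases hmn : m < n
            · rw [if_pos (Or.inr ⟨pvCastSuccNe m, hmn⟩)]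
              rw [if_pos hmn] at ih
              exact ih
            · rw [if_neg (fun h => h.elim (pvCastSuccNe n) (fun hb => hmn hb.2))]
              rw [if_neg hmn] at ih
              rw [pvCastAddTwo, PySem.List.slice_from_natCast, List.drop_succ_cons]
              rw [pvCastAddOne, PySem.List.slice_from_natCast] at ih
              exact ih

-- ===== VERDICT (by name: the statement is the Claim_ definition above) =====
theorem extract_c_string_spec : Claim_equal_extract_c_string := by
  intro s _
  unfold Spec_extract_c_string extract_c_string extract_c_string_alt
  rw [foldl_stepA_0, ← altBody_eq_scan0]
  have h1 : PySem.Str.find s "\"" = PySem.Chars.find s.toList ['"'] := by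
    simp [PySem.Str.find]
  have h2 : PySem.Str.find s "/" = PySem.Chars.find s.toList ['/'] := by
    simp [PySem.Str.find]
  simp only [h1, h2, loopB_eq_takeB]
  split_ifs with h <;> rfl
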